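-- pv_equiv track=rewrite | github.com/NethermindEth/zinc-plus | scripts/optimal_rows_cols.py | find_optimal
-- ===== SOURCE A (Python) =====
-- def proof_size_bits(n_queries, num_rows, num_cols, degree):
--     return n_queries  * 128 * num_rows + num_cols * 256 + n_queries * degree * 128
--
-- def find_optimal(k, n_queries, degree):
--     n = 1 << k  # 2^k
--     best = None
--     for r in range(k + 1):
--         num_rows = 1 << r
--         num_cols = n >> r  # n / num_rows
--         cost = proof_size_bits(n_queries, num_rows, num_cols, degree)
--         if best is None or cost < best[0]:
--             best = (cost, num_rows, num_cols)
--     return best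
-- ===== SOURCE B (Python) =====
-- def find_optimal(k, n_queries, degree):
--     n = 1 << k  # 2^k
--     # cost(r+1) - cost(r) = 128 * (n_queries * 2^r - 2^(k-r-1) * 2), which is >= 0
--     # exactly when n_queries << (2*r) >= n; that difference is nondecreasing in r,
--     # so the earliest minimizer is the first r in [0, k] where it holds (or k).
--     lo, hi = 0, k
--     while lo < hi:
--         mid = (lo + hi) // 2
--         if (n_queries << (2 * mid)) >= n:
--             hi = mid
--         else:
--             lo = mid + 1
--     num_rows = 1 << lo
--     num_cols = n >> lo
--     cost = n_queries * 128 * num_rows + num_cols * 256 + n_queries * degree * 128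
--     return (cost, num_rows, num_cols)
-- ===== Notes on version B (the rewrite author's own statement) =====
-- stated objective: faster
-- what changed: A scans all k+1 row-exponents and keeps the running minimum; B binary-searches for the first exponent where the consecutive cost difference (exact integer comparison n_queries<<2r >= 2^k) turns non-negative, which by monotonicity of that difference is exactly A's earliest minimizer.
-- outside the precondition, e.g. on find_optimal(-1, 3, 2): A raises ValueError, B raises ValueError
import Mathlib
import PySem

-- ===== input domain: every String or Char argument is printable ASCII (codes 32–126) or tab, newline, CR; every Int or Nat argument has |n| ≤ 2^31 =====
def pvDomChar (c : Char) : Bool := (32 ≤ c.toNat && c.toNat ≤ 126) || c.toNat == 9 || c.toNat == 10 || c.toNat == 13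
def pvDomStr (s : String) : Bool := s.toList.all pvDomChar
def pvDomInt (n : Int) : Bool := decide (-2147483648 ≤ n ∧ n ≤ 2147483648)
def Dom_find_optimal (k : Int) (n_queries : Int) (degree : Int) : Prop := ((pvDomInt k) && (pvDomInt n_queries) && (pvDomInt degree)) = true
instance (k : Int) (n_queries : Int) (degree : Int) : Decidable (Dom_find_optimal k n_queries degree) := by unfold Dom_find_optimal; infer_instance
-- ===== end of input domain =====

-- B replaces A's linear scan over all row-exponents by a binary search for the first
-- exponent where the (monotone) consecutive cost difference turns non-negative; same result.


-- ===== PORT A =====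
def proof_size_bits (n_queries : Int) (num_rows : Int) (num_cols : Int) (degree : Int) : Int :=
  n_queries * 128 * num_rows + num_cols * 256 + n_queries * degree * 128

-- the body of A's for-loop (one step of the scan)
def find_optimal_step (n_queries : Int) (degree : Int) (n : Int)
    (best : Option (Int × Int × Int)) (r : Int) : Option (Int × Int × Int) :=
  let num_rows : Int := 1 <<< r.toNat
  let num_cols : Int := n >>> r.toNat
  let cost := proof_size_bits n_queries num_rows num_cols degree
  match best with
  | none => some (cost, num_rows, num_cols)
  | some b => if cost < b.1 then some (cost, num_rows, num_cols) else some b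

def find_optimal (k : Int) (n_queries : Int) (degree : Int) : Int × Int × Int :=
  let n : Int := 1 <<< k.toNat
  let best : Option (Int × Int × Int) :=
    (PySem.List.pyRange 0 (k + 1) 1).foldl (find_optimal_step n_queries degree n) none
  -- Python's best stays None only when k < 0 (where it in fact raises on '1 << k', outside Pre_)
  best.getD (0, 0, 0)

-- ===== PORT B =====
-- the while-loop of Source B (binary search on [lo, hi])
def bisectMin (q : Int) (n : Int) (lo : Int) (hi : Int) : Int :=
  if h : lo < hi then
    if q <<< (2 * PySem.Int.floordiv (lo + hi) 2).toNat ≥ n then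
      bisectMin q n lo (PySem.Int.floordiv (lo + hi) 2)
    else
      bisectMin q n (PySem.Int.floordiv (lo + hi) 2 + 1) hi
  else lo
termination_by (hi - lo).toNat
decreasing_by
  · have hb := PySem.Int.floordiv_two_mid_bounds (lo := lo) (hi := hi) (le_of_lt h)
    have hlt : PySem.Int.floordiv (lo + hi) 2 < hi := by
      rw [PySem.Int.floordiv_lt_iff_lt_mul (by norm_num)]; omega
    omega
  · have hb := PySem.Int.floordiv_two_mid_bounds (lo := lo) (hi := hi) (le_of_lt h)
    omega

def find_optimal_alt (k : Int) (n_queries : Int) (degree : Int) : Int × Int × Int :=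
  let n : Int := 1 <<< k.toNat
  let lo := bisectMin n_queries n 0 k
  let num_rows : Int := 1 <<< lo.toNat
  let num_cols : Int := n >>> lo.toNat
  let cost : Int := n_queries * 128 * num_rows + num_cols * 256 + n_queries * degree * 128
  (cost, num_rows, num_cols)

-- ===== PRECONDITION & SPEC =====
-- Python A raises ValueError ('negative shift count', at '1 << k') for k < 0; excluded.
def Pre_find_optimal (k : Int) (n_queries : Int) (degree : Int) : Prop := 0 ≤ k
instance (k : Int) (n_queries : Int) (degree : Int) : Decidable (Pre_find_optimal k n_queries degree) := by unfold Pre_find_optimal; infer_instance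
def pvWitness_find_optimal : Int × Int × Int := (4, 3, 2)

def Spec_find_optimal (k : Int) (n_queries : Int) (degree : Int) (out : Int × Int × Int) : Prop := out = find_optimal_alt k n_queries degree
instance (k : Int) (n_queries : Int) (degree : Int) (out : Int × Int × Int) : Decidable (Spec_find_optimal k n_queries degree out) := by unfold Spec_find_optimal; infer_instance

-- ===== CLAIM (what is proved, stated in full; the proofs are below) =====
def Claim_equal_find_optimal : Prop := ∀ (k : Int) (n_queries : Int) (degree : Int), Dom_find_optimal k n_queries degree → Pre_find_optimal k n_queries degree → Spec_find_optimal k n_queries degree (find_optimal k n_queries degree)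

-- ===== LEMMAS AND PROOFS =====

-- pvP Q K r: the cost difference cost(r+1) - cost(r) is non-negative at row-exponent r
def pvP (Q : Int) (K : Nat) (r : Nat) : Prop := (2 ^ K : Int) ≤ Q * 2 ^ (2 * r)
-- pvHit: pvP holds, or r is the forced right endpoint K
def pvHit (Q : Int) (K : Nat) (r : Nat) : Prop := pvP Q K r ∨ r = K
def pvHitDec (Q : Int) (K : Nat) : DecidablePred (pvHit Q K) := fun r => by
  unfold pvHit pvP; infer_instance
def pvHitEx (Q : Int) (K : Nat) : ∃ r, pvHit Q K r := ⟨K, Or.inr rfl⟩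
-- the least hit index = the earliest minimizer of the cost over [0, K]
def pvRStar (Q : Int) (K : Nat) : Nat := @Nat.find (pvHit Q K) (pvHitDec Q K) (pvHitEx Q K)
-- the cost at row-exponent r, in Nat-exponent form
def pvCost (Q : Int) (d : Int) (K : Nat) (r : Nat) : Int :=
  Q * 128 * 2 ^ r + (2 ^ (K - r) : Int) * 256 + Q * d * 128

lemma pvP_mono (Q : Int) (K : Nat) {r s : Nat} (h : pvP Q K r) (hrs : r ≤ s) : pvP Q K s := by
  unfold pvP at *
  have h2 : (0:Int) < 2 ^ K := by positivity
  have hQ : 0 < Q := by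
    by_contra hq
    push_neg at hq
    have : Q * 2 ^ (2*r) ≤ 0 := mul_nonpos_of_nonpos_of_nonneg hq (by positivity)
    omega
  calc (2^K : Int) ≤ Q * 2^(2*r) := h
    _ ≤ Q * 2^(2*s) := by
        apply mul_le_mul_of_nonneg_left _ (le_of_lt hQ)
        exact pow_le_pow_right₀ (by norm_num) (by omega)

lemma pvHit_rstar (Q : Int) (K : Nat) : pvHit Q K (pvRStar Q K) := by
  unfold pvRStar; letI := pvHitDec Q K; exact Nat.find_spec (pvHitEx Q K)
lemma pvRStar_le_of_hit (Q : Int) (K : Nat) {m : Nat} (h : pvHit Q K m) : pvRStar Q K ≤ m := by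
  unfold pvRStar; letI := pvHitDec Q K; exact Nat.find_le h
lemma pvRStar_le (Q : Int) (K : Nat) : pvRStar Q K ≤ K :=
  pvRStar_le_of_hit Q K (Or.inr rfl)
lemma pvRStar_min (Q : Int) (K : Nat) {r : Nat} (h : r < pvRStar Q K) : ¬ pvHit Q K r := by
  unfold pvRStar at h; letI := pvHitDec Q K; exact Nat.find_min (pvHitEx Q K) h

lemma pv_diff (Q d : Int) (K : Nat) {r : Nat} (h : r < K) :
    pvCost Q d K (r+1) - pvCost Q d K r = 128 * (Q * 2 ^ r - 2 ^ (K - r - 1) * 2) := by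
  obtain ⟨t, rfl⟩ : ∃ t, K = t + r + 1 := ⟨K - r - 1, by omega⟩
  unfold pvCost
  simp only [show t + r + 1 - r = t + 1 from by omega, show t + r + 1 - (r+1) = t from by omega,
    Nat.add_sub_cancel, pow_succ]
  ring

lemma pvP_iff (Q : Int) (K : Nat) {r : Nat} (h : r < K) :
    pvP Q K r ↔ (2 ^ (K - r - 1) * 2 : Int) ≤ Q * 2 ^ r := by
  obtain ⟨t, rfl⟩ : ∃ t, K = t + r + 1 := ⟨K - r - 1, by omega⟩
  unfold pvP
  rw [show t + r + 1 - r - 1 = t by omega]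
  have e : (2 ^ t * 2 * 2 ^ r : Int) = 2 ^ (t + r + 1) := by
    rw [show t + r + 1 = t + 1 + r by omega, pow_add, pow_add, pow_one]
  have e2 : Q * 2 ^ (2*r) = (Q * 2 ^ r) * 2 ^ r := by rw [two_mul, pow_add]; ring
  have hpos : (0:Int) < 2 ^ r := by positivity
  rw [e2, ← e, Int.mul_le_mul_iff_of_pos_right hpos]

lemma pvCost_succ_le (Q d : Int) (K : Nat) {r : Nat} (h : r < K) (hp : pvP Q K r) :
    pvCost Q d K r ≤ pvCost Q d K (r + 1) := by
  have h1 := pv_diff Q d K h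
  have h2 := (pvP_iff Q K h).mp hp
  linarith

lemma pvCost_succ_lt (Q d : Int) (K : Nat) {r : Nat} (h : r < K) (hp : ¬ pvP Q K r) :
    pvCost Q d K (r + 1) < pvCost Q d K r := by
  have h1 := pv_diff Q d K h
  have h2 : ¬ ((2 ^ (K - r - 1) * 2 : Int) ≤ Q * 2 ^ r) := fun hc => hp ((pvP_iff Q K h).mpr hc)
  push_neg at h2
  linarith

lemma pvCost_mono_from_rstar (Q d : Int) (K : Nat) : ∀ s, pvRStar Q K ≤ s → s ≤ K →
    pvCost Q d K (pvRStar Q K) ≤ pvCost Q d K s := by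
  intro s
  induction s with
  | zero => intro h1 _; rw [Nat.le_zero.mp h1]
  | succ t ih =>
    intro h1 h2
    rcases Nat.lt_or_ge (pvRStar Q K) (t+1) with hlt | hge
    · have ht : pvRStar Q K ≤ t := by omega
      have hP : pvP Q K t := by
        rcases pvHit_rstar Q K with hp | hk
        · exact pvP_mono Q K hp ht
        · have := pvRStar_le Q K; omega
      exact le_trans (ih ht (by omega)) (pvCost_succ_le Q d K (by omega) hP)
    · rw [show pvRStar Q K = t + 1 by omega]

lemma pv_rows (m : Nat) : ((1 <<< m : Nat) : Int) = 2 ^ m := by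
  rw [Nat.shiftLeft_eq]; push_cast; ring

lemma pv_shr_pow {K m : Nat} (h : m ≤ K) : ((2 ^ K : Int) >>> m) = 2 ^ (K - m) := by
  have e : ((2^K : Nat) : Int) >>> m = (((2^K >>> m : Nat)) : Int) := Int.mem_toNat?.mp rfl
  rw [Nat.shiftRight_eq_div_pow, Nat.pow_div h (by norm_num)] at e
  rw [show ((2^K : Int)) = ((2^K : Nat) : Int) by push_cast; ring, e]
  push_cast
  ring

-- ===== A side: the scan keeps the cost at min(prefix end, pvRStar) =====
lemma pv_step_eq (Q d : Int) (K : Nat) {r : Nat} (hr : r ≤ K)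
    (acc : Option (Int × Int × Int)) :
    find_optimal_step Q d (2 ^ K) acc (r : Int)
      = match acc with
        | none => some (pvCost Q d K r, 2 ^ r, 2 ^ (K - r))
        | some b => if pvCost Q d K r < b.1 then
            some (pvCost Q d K r, 2 ^ r, 2 ^ (K - r)) else some b := by
  cases acc with
  | none =>
    simp only [find_optimal_step, Int.toNat_natCast, Int.shiftRight_natCast_right, pv_rows,
      pv_shr_pow hr, proof_size_bits, pvCost]
  | some b =>
    simp only [find_optimal_step, Int.toNat_natCast, Int.shiftRight_natCast_right, pv_rows,
      pv_shr_pow hr, proof_size_bits, pvCost]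

lemma pv_fold_range (Q d : Int) (K : Nat) : ∀ j, j ≤ K →
    (List.range (j + 1)).foldl (fun acc (y : Nat) => find_optimal_step Q d (2 ^ K) acc (y : Int))
      none
    = some (pvCost Q d K (min j (pvRStar Q K)), 2 ^ (min j (pvRStar Q K)),
            2 ^ (K - min j (pvRStar Q K))) := by
  intro j
  induction j with
  | zero =>
    intro _
    simp only [List.range_succ, List.range_zero, List.foldl_nil, List.foldl_cons, List.nil_append]
    rw [pv_step_eq Q d K (Nat.zero_le K) none]
    simp
  | succ t ih =>
    intro h
    rw [List.range_succ, List.foldl_append, ih (by omega)]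
    simp only [List.foldl_cons, List.foldl_nil]
    rw [pv_step_eq Q d K (show t + 1 ≤ K by omega)]
    rcases Nat.lt_or_ge t (pvRStar Q K) with hlt | hge
    · have hmt : min t (pvRStar Q K) = t := by omega
      have hm : min (t+1) (pvRStar Q K) = t + 1 := by omega
      have hnp : ¬ pvP Q K t := fun hp => (pvRStar_min Q K hlt) (Or.inl hp)
      have hlt2 := pvCost_succ_lt Q d K (show t < K by omega) hnp
      rw [hmt, hm]
      simp [hlt2]
    · have hm : min (t+1) (pvRStar Q K) = pvRStar Q K := by omega
      have hmt : min t (pvRStar Q K) = pvRStar Q K := by omega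
      have hle : pvCost Q d K (pvRStar Q K) ≤ pvCost Q d K (t+1) :=
        pvCost_mono_from_rstar Q d K (t+1) (by omega) h
      rw [hmt, hm]
      simp [not_lt.mpr hle]

lemma pv_A_eq (k Q d : Int) (hk : 0 ≤ k) :
    find_optimal k Q d
      = (pvCost Q d k.toNat (pvRStar Q k.toNat), 2 ^ (pvRStar Q k.toNat),
         2 ^ (k.toNat - pvRStar Q k.toNat)) := by
  simp only [find_optimal]
  rw [PySem.List.pyRange_zero, show (k+1).toNat = k.toNat + 1 from by omega, List.foldl_map,
    pv_rows k.toNat, pv_fold_range Q d k.toNat k.toNat (le_refl _),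
    min_eq_right (pvRStar_le Q k.toNat)]
  rfl

-- ===== B side: the binary search lands on pvRStar =====
lemma pv_bisect (Q : Int) (K : Nat) : ∀ (fuel : Nat) (lo hi : Int), (hi - lo).toNat ≤ fuel →
    0 ≤ lo → lo ≤ hi → hi ≤ (K : Int) →
    (∀ r : Nat, (r : Int) < lo → ¬ pvHit Q K r) → pvHit Q K hi.toNat →
    bisectMin Q (2 ^ K) lo hi = (pvRStar Q K : Int) := by
  intro fuel
  induction fuel with
  | zero =>
    intro lo hi hf h0 hlh hhk hinv hhit
    rw [bisectMin, dif_neg (by omega)]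
    have h1 : pvRStar Q K ≤ hi.toNat := pvRStar_le_of_hit Q K hhit
    have h2 : lo.toNat ≤ pvRStar Q K := by
      by_contra hcon
      push_neg at hcon
      exact hinv (pvRStar Q K) (by omega) (pvHit_rstar Q K)
    omega
  | succ f ihf =>
    intro lo hi hf h0 hlh hhk hinv hhit
    rw [bisectMin]
    by_cases hlo : lo < hi
    · rw [dif_pos hlo]
      have hb := PySem.Int.floordiv_two_mid_bounds (lo := lo) (hi := hi) (le_of_lt hlo)
      have hmlt : PySem.Int.floordiv (lo + hi) 2 < hi := by
        rw [PySem.Int.floordiv_lt_iff_lt_mul (by norm_num)]; omega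
      set mid := PySem.Int.floordiv (lo + hi) 2 with hmid
      have hshift : Q <<< (2*mid).toNat = Q * 2 ^ (2 * mid.toNat) := by
        rw [show (2*mid).toNat = 2 * mid.toNat from by omega, Int.shiftLeft_eq]
      by_cases hc : Q <<< (2 * mid).toNat ≥ (2^K : Int)
      · rw [if_pos hc]
        apply ihf lo mid (by omega) h0 (by omega) (by omega) hinv
        exact Or.inl (by rw [hshift] at hc; exact hc)
      · rw [if_neg hc]
        apply ihf (mid+1) hi (by omega) (by omega) (by omega) hhk _ hhit
        intro r hr
        have hnp : ¬ pvP Q K mid.toNat := fun hp => hc (by rw [ge_iff_le, hshift]; exact hp)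
        rintro (hp | hkK)
        · exact hnp (pvP_mono Q K hp (by omega))
        · omega
    · rw [dif_neg hlo]
      have h1 : pvRStar Q K ≤ hi.toNat := pvRStar_le_of_hit Q K hhit
      have h2 : lo.toNat ≤ pvRStar Q K := by
        by_contra hcon
        push_neg at hcon
        exact hinv (pvRStar Q K) (by omega) (pvHit_rstar Q K)
      omega

lemma pv_B_eq (k Q d : Int) (hk : 0 ≤ k) :
    find_optimal_alt k Q d
      = (pvCost Q d k.toNat (pvRStar Q k.toNat), 2 ^ (pvRStar Q k.toNat),
         2 ^ (k.toNat - pvRStar Q k.toNat)) := by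
  have hb : bisectMin Q (2 ^ k.toNat) 0 k = (pvRStar Q k.toNat : Int) := by
    apply pv_bisect Q k.toNat k.toNat 0 k (by omega) (le_refl 0) hk (by omega)
    · intro r hr
      have : (0:Int) ≤ (r:Int) := by positivity
      omega
    · exact Or.inr (by omega)
  simp only [find_optimal_alt, pv_rows, hb, Int.toNat_natCast,
    pv_shr_pow (pvRStar_le Q k.toNat), pvCost]

-- ===== VERDICT (by name: the statement is the Claim_ definition above) =====
theorem find_optimal_spec : Claim_equal_find_optimal := by
  intro k q d _ hpre
  unfold Spec_find_optimal
  rw [pv_A_eq k q d hpre, pv_B_eq k q d hpre]
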